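-- pv_equiv track=rewrite | github.com/SueAli/cs-problems | UVA/11203 - Can you decide it for ME?.py | isTheorem
-- ===== SOURCE A (Python) =====
-- def isTheorem(me_txt):
--     front_symb = 0
--     mid_symb = 0
--     back_symb = 0
--     i = 0
--     while i < len(me_txt) and me_txt[i] != 'M':
--         if me_txt[i] == '?':
--             front_symb += 1
--         else:
--             return "no-theorem"
--         i += 1
--
--     if i == len(me_txt): # 'M' Not found
--         return "no-theorem"
--     else:
--         i += 1 # to pass the 'M' char
--         while i < len(me_txt) and me_txt[i] != 'E':
--             if me_txt[i] == '?':
--                 mid_symb += 1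
--             else:
--                 return "no-theorem"
--             i += 1
--         if i == len(me_txt) : # 'E' char not found
--             return "no-theorem"
--         else:
--             i+= 1
--             while i < len(me_txt):
--                 if me_txt[i] == '?':
--                     back_symb += 1
--                 else:
--                     return "no-theorem"
--                 i += 1
--     if not (mid_symb == 0 or back_symb == 0 or front_symb == 0 ) \
--             and ( (mid_symb == 1 and back_symb - front_symb == 1 ) or
--                       (front_symb + mid_symb == back_symb)):
--         return 'theorem'
--     return "no-theorem"
-- ===== SOURCE B (Python) =====
-- def isTheorem(me_txt):
--     if me_txt.count('M') != 1 or me_txt.count('E') != 1: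
--         return "no-theorem"
--     mi = me_txt.index('M')
--     ei = me_txt.index('E')
--     if mi > ei or any(c not in '?ME' for c in me_txt):
--         return "no-theorem"
--     f, m, b = mi, ei - mi - 1, len(me_txt) - ei - 1
--     if f != 0 and m != 0 and b != 0 and ((m == 1 and b - f == 1) or f + m == b):
--         return 'theorem'
--     return "no-theorem"
-- ===== Notes on version B (the rewrite author's own statement) =====
-- stated objective: simpler
-- what changed: B replaces A's three-phase index-driven while-loop scan with arithmetic on count/index: it checks exactly one 'M' and one 'E' via str.count, takes their positions via str.index, verifies M precedes E and that every character is in '?ME', and derives the three '?'-block lengths from the positions instead of counting them in loops.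
import Mathlib
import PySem

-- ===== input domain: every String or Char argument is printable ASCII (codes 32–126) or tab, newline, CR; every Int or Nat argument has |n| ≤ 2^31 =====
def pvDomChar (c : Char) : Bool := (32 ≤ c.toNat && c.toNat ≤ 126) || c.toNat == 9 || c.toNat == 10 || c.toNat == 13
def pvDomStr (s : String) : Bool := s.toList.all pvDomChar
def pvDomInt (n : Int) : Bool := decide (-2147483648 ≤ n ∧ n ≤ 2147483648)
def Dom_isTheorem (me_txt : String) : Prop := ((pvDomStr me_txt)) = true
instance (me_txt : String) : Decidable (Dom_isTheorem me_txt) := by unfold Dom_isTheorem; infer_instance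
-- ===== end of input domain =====

-- B checks counts/positions of 'M' and 'E' and derives the '?'-block lengths arithmetically,
-- instead of A's three sequential counting while-loops (objective: simpler).

-- ===== PORT A =====
-- first while loop: count '?' until 'M'; none = early "no-theorem" or 'M' not found
def pvGoFront : List Char → Int → Option (Int × List Char)
  | [], _ => none
  | c :: rest, acc =>
    if c = 'M' then some (acc, rest)
    else if c = '?' then pvGoFront rest (acc + 1)
    else none

-- second while loop: count '?' until 'E'
def pvGoMid : List Char → Int → Option (Int × List Char)
  | [], _ => none
  | c :: rest, acc =>
    if c = 'E' then some (acc, rest)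
    else if c = '?' then pvGoMid rest (acc + 1)
    else none

-- third while loop: count '?' to the end
def pvGoBack : List Char → Int → Option Int
  | [], acc => some acc
  | c :: rest, acc =>
    if c = '?' then pvGoBack rest (acc + 1)
    else none

def isTheorem (me_txt : String) : String :=
  match pvGoFront me_txt.toList 0 with
  | none => "no-theorem"
  | some (front_symb, r1) =>
    match pvGoMid r1 0 with
    | none => "no-theorem"
    | some (mid_symb, r2) =>
      match pvGoBack r2 0 with
      | none => "no-theorem"
      | some back_symb =>
        if ¬(mid_symb = 0 ∨ back_symb = 0 ∨ front_symb = 0) ∧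
           ((mid_symb = 1 ∧ back_symb - front_symb = 1) ∨ front_symb + mid_symb = back_symb)
        then "theorem" else "no-theorem"

-- ===== PORT B =====
def isTheorem_alt (me_txt : String) : String :=
  let l := me_txt.toList
  if l.count 'M' ≠ 1 ∨ l.count 'E' ≠ 1 then "no-theorem"
  else
    match PySem.List.index? l 'M', PySem.List.index? l 'E' with
    | some mi, some ei =>
      if ei < mi ∨ ¬(l.all fun c => c == '?' || c == 'M' || c == 'E') then "no-theorem"
      else
        let f : Int := mi
        let m : Int := (ei : Int) - mi - 1
        let b : Int := (l.length : Int) - ei - 1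
        if f ≠ 0 ∧ m ≠ 0 ∧ b ≠ 0 ∧ ((m = 1 ∧ b - f = 1) ∨ f + m = b)
        then "theorem" else "no-theorem"
    | _, _ => "no-theorem"  -- unreachable: count = 1 guarantees index? = some

-- ===== PRECONDITION & SPEC =====
def Spec_isTheorem (me_txt : String) (out : String) : Prop := out = isTheorem_alt me_txt
instance (me_txt : String) (out : String) : Decidable (Spec_isTheorem me_txt out) := by unfold Spec_isTheorem; infer_instance

-- ===== CLAIM (what is proved, stated in full; the proofs are below) =====
def Claim_equal_isTheorem : Prop := ∀ (me_txt : String), Dom_isTheorem me_txt → Spec_isTheorem me_txt (isTheorem me_txt)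

-- ===== LEMMAS AND PROOFS =====

lemma pvGoFront_replicate (a : Nat) (rest : List Char) (acc : Int) :
    pvGoFront (List.replicate a '?' ++ 'M' :: rest) acc = some (acc + a, rest) := by
  induction a generalizing acc with
  | zero => simp [pvGoFront]
  | succ n ih =>
    simp only [List.replicate_succ, List.cons_append, pvGoFront,
      if_neg (by decide : ¬('?' = 'M')), ih]
    simp [Prod.ext_iff]
    ring

lemma pvGoMid_replicate (a : Nat) (rest : List Char) (acc : Int) :
    pvGoMid (List.replicate a '?' ++ 'E' :: rest) acc = some (acc + a, rest) := by
  induction a generalizing acc with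
  | zero => simp [pvGoMid]
  | succ n ih =>
    simp only [List.replicate_succ, List.cons_append, pvGoMid,
      if_neg (by decide : ¬('?' = 'E')), ih]
    simp [Prod.ext_iff]
    ring

lemma pvGoBack_replicate (a : Nat) (acc : Int) :
    pvGoBack (List.replicate a '?') acc = some (acc + a) := by
  induction a generalizing acc with
  | zero => simp [pvGoBack]
  | succ n ih =>
    simp only [List.replicate_succ, pvGoBack, ih]
    simp
    ring

lemma pvGoFront_some {l : List Char} {acc f : Int} {r : List Char}
    (h : pvGoFront l acc = some (f, r)) :
    ∃ k : Nat, l = List.replicate k '?' ++ 'M' :: r ∧ f = acc + k := by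
  induction l generalizing acc with
  | nil => simp [pvGoFront] at h
  | cons c rest ih =>
    by_cases hM : c = 'M'
    · subst hM
      simp [pvGoFront] at h
      exact ⟨0, by simp [h.2], by simp [h.1]⟩
    · by_cases hq : c = '?'
      · subst hq
        rw [pvGoFront, if_neg hM, if_pos rfl] at h
        obtain ⟨k, hrest, hf⟩ := ih h
        exact ⟨k + 1, by simp [hrest, List.replicate_succ], by push_cast [hf]; ring⟩
      · rw [pvGoFront, if_neg hM, if_neg hq] at h
        exact absurd h (by simp)

lemma pvGoMid_some {l : List Char} {acc f : Int} {r : List Char}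
    (h : pvGoMid l acc = some (f, r)) :
    ∃ k : Nat, l = List.replicate k '?' ++ 'E' :: r ∧ f = acc + k := by
  induction l generalizing acc with
  | nil => simp [pvGoMid] at h
  | cons c rest ih =>
    by_cases hM : c = 'E'
    · subst hM
      simp [pvGoMid] at h
      exact ⟨0, by simp [h.2], by simp [h.1]⟩
    · by_cases hq : c = '?'
      · subst hq
        rw [pvGoMid, if_neg hM, if_pos rfl] at h
        obtain ⟨k, hrest, hf⟩ := ih h
        exact ⟨k + 1, by simp [hrest, List.replicate_succ], by push_cast [hf]; ring⟩
      · rw [pvGoMid, if_neg hM, if_neg hq] at h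
        exact absurd h (by simp)

lemma pvGoBack_some {l : List Char} {acc b : Int}
    (h : pvGoBack l acc = some b) :
    l = List.replicate l.length '?' ∧ b = acc + l.length := by
  induction l generalizing acc with
  | nil => simp [pvGoBack] at h; simp [h]
  | cons c rest ih =>
    by_cases hq : c = '?'
    · subst hq
      rw [pvGoBack, if_pos rfl] at h
      obtain ⟨hrest, hb⟩ := ih h
      refine ⟨by simpa [List.replicate_succ] using hrest, ?_⟩
      rw [hb]
      push_cast [List.length_cons]
      ring
    · rw [pvGoBack, if_neg hq] at h
      exact absurd h (by simp)

lemma pvCount_M (a b c : Nat) :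
    (List.replicate a '?' ++ 'M' :: (List.replicate b '?' ++ 'E' :: List.replicate c '?')).count 'M' = 1 := by
  simp [List.count_append, List.count_replicate]

lemma pvCount_E (a b c : Nat) :
    (List.replicate a '?' ++ 'M' :: (List.replicate b '?' ++ 'E' :: List.replicate c '?')).count 'E' = 1 := by
  simp [List.count_append, List.count_replicate]

lemma pvIdx_M (a b c : Nat) :
    PySem.List.index? (List.replicate a '?' ++ 'M' :: (List.replicate b '?' ++ 'E' :: List.replicate c '?')) 'M'
      = some a := by
  apply (PySem.List.index?_eq_some_iff _ _ _).mpr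
  exact ⟨List.replicate a '?', _, rfl, by simp, by simp⟩

lemma pvIdx_E (a b c : Nat) :
    PySem.List.index? (List.replicate a '?' ++ 'M' :: (List.replicate b '?' ++ 'E' :: List.replicate c '?')) 'E'
      = some (a + 1 + b) := by
  apply (PySem.List.index?_eq_some_iff _ _ _).mpr
  refine ⟨List.replicate a '?' ++ 'M' :: List.replicate b '?', List.replicate c '?',
    by simp, by simp; omega, by simp⟩

lemma pvAll_ok (a b c : Nat) :
    ((List.replicate a '?' ++ 'M' :: (List.replicate b '?' ++ 'E' :: List.replicate c '?')).all
      fun c => c == '?' || c == 'M' || c == 'E') = true := by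
  simp [List.all_append]

lemma pvLen_canon (a b c : Nat) :
    (List.replicate a '?' ++ 'M' :: (List.replicate b '?' ++ 'E' :: List.replicate c '?')).length
      = a + b + c + 2 := by
  simp
  omega

lemma pvShape_eq (s : String) (a b c : Nat)
    (h : s.toList = List.replicate a '?' ++ 'M' :: (List.replicate b '?' ++ 'E' :: List.replicate c '?')) :
    isTheorem s = isTheorem_alt s := by
  rw [isTheorem, isTheorem_alt, h]
  simp only [pvGoFront_replicate, pvGoMid_replicate, pvGoBack_replicate,
    pvCount_M, pvCount_E, pvIdx_M, pvIdx_E, pvAll_ok, pvLen_canon,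
    ne_eq, not_true_eq_false, or_self, if_false, not_false_eq_true, Bool.not_true, or_false]
  rw [if_neg (by omega : ¬ a + 1 + b < a)]
  apply if_congr _ rfl rfl
  constructor <;> intro hc <;> push_cast at hc ⊢ <;> omega

lemma pvAll_mem {l : List Char}
    (hall : (l.all fun c => c == '?' || c == 'M' || c == 'E') = true)
    {c : Char} (hc : c ∈ l) : c = '?' ∨ c = 'M' ∨ c = 'E' := by
  have h2 := List.all_eq_true.mp hall c hc
  simp only [Bool.or_eq_true, beq_iff_eq] at h2
  exact or_assoc.mp h2

lemma pvGuards_shape (l : List Char) (mi ei : Nat)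
    (hM : l.count 'M' = 1) (hE : l.count 'E' = 1)
    (hmi : PySem.List.index? l 'M' = some mi)
    (hei : PySem.List.index? l 'E' = some ei)
    (hord : ¬ ei < mi)
    (hall : (l.all fun c => c == '?' || c == 'M' || c == 'E') = true) :
    l = List.replicate mi '?' ++ 'M' ::
        (List.replicate (ei - mi - 1) '?' ++ 'E' :: List.replicate (l.length - ei - 1) '?') := by
  obtain ⟨p, s, hls, hplen, hMp⟩ := (PySem.List.index?_eq_some_iff _ _ _).mp hmi
  -- 'E' is not in the prefix p
  have hEp : 'E' ∉ p := by
    intro hmem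
    have h1 : PySem.List.index? l 'E' = PySem.List.index? p 'E' := by
      rw [hls, show p ++ 'M' :: s = p ++ ('M' :: s) from rfl]
      exact PySem.List.index?_append_of_mem _ hmem
    obtain ⟨j, hj⟩ := (PySem.List.index?_isSome_iff _ _).mpr hmem |> Option.isSome_iff_exists.mp
    obtain ⟨pre, suf, hpd, hprel, _⟩ := (PySem.List.index?_eq_some_iff _ _ _).mp hj
    have : j < p.length := by
      rw [hpd]
      simp only [List.length_append, List.length_cons]
      omega
    rw [h1, hj] at hei
    injection hei with hei
    omega
  -- 'E' occurs in s
  have hEl : 'E' ∈ l := (PySem.List.index?_isSome_iff _ _).mp (by rw [hei]; rfl)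
  have hEs : 'E' ∈ s := by
    rw [hls] at hEl
    rcases List.mem_append.mp hEl with h' | h'
    · exact absurd h' hEp
    · rcases List.mem_cons.mp h' with h'' | h''
      · exact absurd h''.symm (by decide)
      · exact h''
  obtain ⟨k, hk⟩ := Option.isSome_iff_exists.mp ((PySem.List.index?_isSome_iff _ _).mpr hEs)
  obtain ⟨q, r, hs, hqlen, hEq⟩ := (PySem.List.index?_eq_some_iff _ _ _).mp hk
  -- the position of 'E' in l
  have hei' : PySem.List.index? l 'E' = some (mi + 1 + k) := by
    apply (PySem.List.index?_eq_some_iff _ _ _).mpr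
    refine ⟨p ++ 'M' :: q, r, by rw [hls, hs]; simp, by simp only [List.length_append, List.length_cons]; omega, ?_⟩
    simp [hEp, hEq]
  have heiv : ei = mi + 1 + k := by
    rw [hei'] at hei
    exact (Option.some.inj hei).symm
  -- counts pin down where 'M' and 'E' may occur
  have hMs : 'M' ∉ s := by
    rw [hls] at hM
    simp [List.count_append, List.count_eq_zero_of_not_mem hMp] at hM
    exact List.count_eq_zero.mp hM
  have hMq : 'M' ∉ q := fun h' => hMs (by rw [hs]; simp [h'])
  have hMr : 'M' ∉ r := fun h' => hMs (by rw [hs]; simp [h'])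
  have hEr : 'E' ∉ r := by
    rw [hls, hs] at hE
    simp [List.count_append, List.count_eq_zero_of_not_mem hEp,
      List.count_eq_zero_of_not_mem hEq] at hE
    exact List.count_eq_zero.mp hE
  -- every remaining character is '?'
  have hp : p = List.replicate p.length '?' := by
    apply List.eq_replicate_length.mpr
    intro x hx
    have hxl : x ∈ l := by rw [hls]; simp [hx]
    rcases pvAll_mem hall hxl with h' | h' | h'
    · exact h'
    · exact absurd (h' ▸ hx) hMp
    · exact absurd (h' ▸ hx) hEp
  have hq' : q = List.replicate q.length '?' := by
    apply List.eq_replicate_length.mpr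
    intro x hx
    have hxl : x ∈ l := by rw [hls, hs]; simp [hx]
    rcases pvAll_mem hall hxl with h' | h' | h'
    · exact h'
    · exact absurd (h' ▸ hx) hMq
    · exact absurd (h' ▸ hx) hEq
  have hr : r = List.replicate r.length '?' := by
    apply List.eq_replicate_length.mpr
    intro x hx
    have hxl : x ∈ l := by rw [hls, hs]; simp [hx]
    rcases pvAll_mem hall hxl with h' | h' | h'
    · exact h'
    · exact absurd (h' ▸ hx) hMr
    · exact absurd (h' ▸ hx) hEr
  -- assemble
  have hlen : l.length = p.length + 1 + q.length + 1 + r.length := by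
    rw [hls, hs]; simp; omega
  rw [hls, hs]
  have e3' : (p ++ 'M' :: (q ++ 'E' :: r)).length - ei - 1 = r.length := by
    simp only [List.length_append, List.length_cons]
    omega
  have e2 : ei - mi - 1 = q.length := by omega
  rw [e3', e2, ← hplen, ← hp, ← hq', ← hr]

lemma pvAlt_shape (s : String)
    (h : ∀ a b c : Nat,
      s.toList ≠ List.replicate a '?' ++ 'M' :: (List.replicate b '?' ++ 'E' :: List.replicate c '?')) :
    isTheorem_alt s = "no-theorem" := by
  rw [isTheorem_alt]
  by_cases hg : s.toList.count 'M' ≠ 1 ∨ s.toList.count 'E' ≠ 1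
  · rw [if_pos hg]
  · rw [if_neg hg]
    push Not at hg
    obtain ⟨hM, hE⟩ := hg
    obtain ⟨mi, hmi⟩ := Option.isSome_iff_exists.mp
      ((PySem.List.index?_isSome_iff _ _).mpr (List.count_pos_iff.mp (hM ▸ Nat.one_pos)))
    obtain ⟨ei, hei⟩ := Option.isSome_iff_exists.mp
      ((PySem.List.index?_isSome_iff _ _).mpr (List.count_pos_iff.mp (hE ▸ Nat.one_pos)))
    simp only [hmi, hei]
    by_cases hbad : ei < mi ∨ ¬ (s.toList.all fun c => c == '?' || c == 'M' || c == 'E') = true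
    · rw [if_pos hbad]
    · rw [if_neg hbad]
      push Not at hbad
      exact absurd (pvGuards_shape s.toList mi ei hM hE hmi hei (by omega) hbad.2)
        (h mi (ei - mi - 1) (s.toList.length - ei - 1))

-- ===== VERDICT (by name: the statement is the Claim_ definition above) =====
theorem isTheorem_spec : Claim_equal_isTheorem := by
  intro s _
  unfold Spec_isTheorem
  match hf : pvGoFront s.toList 0 with
  | none =>
    rw [pvAlt_shape s ?_]
    · simp only [isTheorem, hf]
    · intro a b c heq
      rw [heq, pvGoFront_replicate] at hf
      exact absurd hf (by simp)
  | some (f, r1) =>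
    match hm : pvGoMid r1 0 with
    | none =>
      rw [pvAlt_shape s ?_]
      · simp only [isTheorem, hf, hm]
      · intro a b c heq
        rw [heq, pvGoFront_replicate] at hf
        simp only [Option.some.injEq, Prod.mk.injEq] at hf
        rw [← hf.2, pvGoMid_replicate] at hm
        exact absurd hm (by simp)
    | some (m, r2) =>
      match hb : pvGoBack r2 0 with
      | none =>
        rw [pvAlt_shape s ?_]
        · simp only [isTheorem, hf, hm, hb]
        · intro a b c heq
          rw [heq, pvGoFront_replicate] at hf
          simp only [Option.some.injEq, Prod.mk.injEq] at hf
          rw [← hf.2, pvGoMid_replicate] at hm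
          simp only [Option.some.injEq, Prod.mk.injEq] at hm
          rw [← hm.2, pvGoBack_replicate] at hb
          exact absurd hb (by simp)
      | some b =>
        obtain ⟨k1, h1, _⟩ := pvGoFront_some hf
        obtain ⟨k2, h2, _⟩ := pvGoMid_some hm
        obtain ⟨h3, _⟩ := pvGoBack_some hb
        refine pvShape_eq s k1 k2 r2.length ?_
        conv_lhs => rw [h1, h2, h3]
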